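-- pv_equiv track=rewrite | github.com/aaweaver-actuary/rep-grower | src/rep_grow/grow.py | _initial_moves_slug
-- ===== SOURCE A (Python) =====
-- def _initial_moves_slug(initial_san: str) -> str:
--     slug = ""
--     for index, move in enumerate(initial_san.split()):
--         move_number = (index // 2) + 1
--         if index == 0:
--             slug += f"{move_number}_{move}"
--         elif index % 2 == 0:
--             slug += f"_{move_number}_{move}"
--         else:
--             slug += f"_{move}"
--     return slug
-- ===== SOURCE B (Python) =====
-- def _initial_moves_slug(initial_san: str) -> str:
--     moves = initial_san.split()
--     parts = []
--     n = 1
--     while moves: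
--         pair, moves = moves[:2], moves[2:]
--         parts.append(str(n) + "_" + "_".join(pair))
--         n += 1
--     return "_".join(parts)
-- ===== Notes on version B (the rewrite author's own statement) =====
-- stated objective: alternative
-- what changed: B groups the split moves into pairs (a numbered part per pair, joined at the end) instead of A's per-token loop that branches on index parity while concatenating onto a growing string.
import Mathlib
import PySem

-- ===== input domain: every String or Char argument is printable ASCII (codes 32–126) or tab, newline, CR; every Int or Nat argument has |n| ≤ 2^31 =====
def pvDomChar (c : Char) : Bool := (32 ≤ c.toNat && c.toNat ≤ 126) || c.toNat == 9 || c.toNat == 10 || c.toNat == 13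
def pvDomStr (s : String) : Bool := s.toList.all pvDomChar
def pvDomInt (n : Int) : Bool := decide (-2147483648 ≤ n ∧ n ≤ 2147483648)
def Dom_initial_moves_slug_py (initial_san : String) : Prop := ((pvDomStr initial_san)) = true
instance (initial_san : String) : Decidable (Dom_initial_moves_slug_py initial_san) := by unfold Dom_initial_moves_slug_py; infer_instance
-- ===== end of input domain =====

-- B replaces A's per-token index-parity branching by a pair-chunking pass that joins numbered parts at the end (objective: alternative decomposition, same cost).

-- ===== PORT A =====
-- the loop body of A (one enumerate step: index-0 / even-index / odd-index branches)
def bodyA (slug : String) (im : Int × String) : String :=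
  let index := im.1
  let move := im.2
  let move_number := PySem.Int.floordiv index 2 + 1
  if index = 0 then slug ++ (PySem.Int.toStr move_number ++ "_" ++ move)
  else if PySem.Int.mod index 2 = 0 then slug ++ ("_" ++ PySem.Int.toStr move_number ++ "_" ++ move)
  else slug ++ ("_" ++ move)

def initial_moves_slug_py (initial_san : String) : String :=
  (PySem.List.enumerate (PySem.Str.split₀ initial_san) 0).foldl bodyA ""

-- ===== PORT B =====
-- B's while loop: each pass takes pair = moves[:2], moves = moves[2:]; the two slices are
-- resolved by matching on whether at least two moves remain (exact for lists).
def chunkLoopB : List String → Int → List String → List String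
  | [], _, parts => parts
  | [m], n, parts => parts ++ [PySem.Int.toStr n ++ "_" ++ PySem.Str.join "_" [m]]
  | m1 :: m2 :: rest, n, parts =>
      chunkLoopB rest (n + 1) (parts ++ [PySem.Int.toStr n ++ "_" ++ PySem.Str.join "_" [m1, m2]])

def initial_moves_slug_py_alt (initial_san : String) : String :=
  PySem.Str.join "_" (chunkLoopB (PySem.Str.split₀ initial_san) 1 [])

-- ===== PRECONDITION & SPEC =====
def Spec_initial_moves_slug_py (initial_san : String) (out : String) : Prop := out = initial_moves_slug_py_alt initial_san
instance (initial_san : String) (out : String) : Decidable (Spec_initial_moves_slug_py initial_san out) := by unfold Spec_initial_moves_slug_py; infer_instance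

-- ===== CLAIM (what is proved, stated in full; the proofs are below) =====
def Claim_equal_initial_moves_slug_py : Prop := ∀ (initial_san : String), Dom_initial_moves_slug_py initial_san → Spec_initial_moves_slug_py initial_san (initial_moves_slug_py initial_san)

-- ===== LEMMAS AND PROOFS =====

-- the common suffix both programs produce for the moves at even index 2*k onward (k ≥ 1)
def refA : List String → Int → String
  | [], _ => ""
  | [m], k => "_" ++ PySem.Int.toStr (k + 1) ++ "_" ++ m
  | m1 :: m2 :: rest, k => "_" ++ PySem.Int.toStr (k + 1) ++ "_" ++ m1 ++ "_" ++ m2 ++ refA rest (k + 1)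

theorem joinC_append (sep : List Char) (ps : List (List Char)) (q : List Char) (h : ps ≠ []) :
    PySem.Chars.join sep (ps ++ [q]) = PySem.Chars.join sep ps ++ sep ++ q := by
  induction ps with
  | nil => simp at h
  | cons p ps ih =>
    cases ps with
    | nil => simp [PySem.Chars.join_cons_cons, PySem.Chars.join_singleton]
    | cons p2 ps2 =>
      rw [List.cons_append, PySem.Chars.join_cons_cons, List.cons_append,
          PySem.Chars.join_cons_cons (sep := sep)]
      rw [show p2 :: (ps2 ++ [q]) = (p2 :: ps2) ++ [q] from rfl, ih (by simp)]
      simp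

theorem joinS_append (ps : List String) (q : String) (h : ps ≠ []) :
    PySem.Str.join "_" (ps ++ [q]) = PySem.Str.join "_" ps ++ "_" ++ q := by
  rw [PySem.Str.join, PySem.Str.join, ← String.toList_inj]
  simp only [List.map_append, List.map]
  rw [joinC_append _ _ _ (by simpa using h)]
  simp

theorem joinS_one (m : String) : PySem.Str.join "_" [m] = m := by
  simp [PySem.Str.join, PySem.Chars.join_singleton]

theorem joinS_two (a b : String) : PySem.Str.join "_" [a, b] = a ++ "_" ++ b := by
  rw [PySem.Str.join]
  simp only [List.map]
  rw [PySem.Chars.join_cons_cons, PySem.Chars.join_singleton, ← String.toList_inj]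
  simp

theorem lemA : ∀ (xs : List String) (k : Int) (slug : String), 1 ≤ k →
    List.foldl bodyA slug (PySem.List.enumerate xs (2 * k)) = slug ++ refA xs k
  | [], k, slug, _ => by simp [PySem.List.enumerate_nil, refA]
  | [m], k, slug, hk => by
    simp only [PySem.List.enumerate_cons, PySem.List.enumerate_nil, List.foldl, refA, bodyA]
    have h0 : ¬ (2 * k = 0) := by omega
    simp [h0, PySem.Int.mod, PySem.Int.floordiv, String.append_assoc]
  | m1 :: m2 :: rest, k, slug, hk => by
    simp only [PySem.List.enumerate_cons, List.foldl]
    have hre : 2 * k + 1 + 1 = 2 * (k + 1) := by ring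
    rw [hre, lemA rest (k + 1) _ (by omega)]
    have h0 : ¬ (2 * k = 0) := by omega
    have h1 : ¬ (2 * k + 1 = 0) := by omega
    have hm1 : PySem.Int.mod (2 * k + 1) 2 ≠ 0 := by simp [PySem.Int.mod]
    simp only [bodyA, refA, h0, h1, hm1, if_false]
    simp [PySem.Int.mod, PySem.Int.floordiv, String.append_assoc]

theorem lemB : ∀ (xs : List String) (k : Int) (parts : List String) (p : String),
    PySem.Str.join "_" (chunkLoopB xs (k + 1) (parts ++ [p])) =
      PySem.Str.join "_" (parts ++ [p]) ++ refA xs k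
  | [], k, parts, p => by simp [chunkLoopB, refA]
  | [m], k, parts, p => by
    rw [chunkLoopB, show parts ++ [p] ++ [PySem.Int.toStr (k+1) ++ "_" ++ PySem.Str.join "_" [m]]
          = (parts ++ [p]) ++ [PySem.Int.toStr (k+1) ++ "_" ++ PySem.Str.join "_" [m]] from rfl,
        joinS_append _ _ (by simp), joinS_one, refA]
    simp [String.append_assoc]
  | m1 :: m2 :: rest, k, parts, p => by
    rw [chunkLoopB, show k + 1 + 1 = (k + 1) + 1 from rfl,
        lemB rest (k + 1) (parts ++ [p]) (PySem.Int.toStr (k+1) ++ "_" ++ PySem.Str.join "_" [m1, m2]),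
        joinS_append _ _ (by simp), joinS_two, refA]
    simp [String.append_assoc]

theorem main_eq : ∀ (xs : List String),
    List.foldl bodyA "" (PySem.List.enumerate xs 0) = PySem.Str.join "_" (chunkLoopB xs 1 [])
  | [] => by simp [PySem.List.enumerate_nil, chunkLoopB, PySem.Str.join, PySem.Chars.join_nil]
  | [m] => by
    simp only [PySem.List.enumerate_cons, PySem.List.enumerate_nil, List.foldl, bodyA, chunkLoopB,
      List.nil_append]
    rw [joinS_one, joinS_one]
    simp [PySem.Int.floordiv]
  | m1 :: m2 :: rest => by
    simp only [PySem.List.enumerate_cons, List.foldl, bodyA]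
    rw [show (0 : Int) + 1 + 1 = 2 * 1 from by ring, lemA rest 1 _ (by omega)]
    rw [chunkLoopB, List.nil_append,
        show (1 : Int) + 1 = 1 + 1 from rfl,
        show [PySem.Int.toStr 1 ++ "_" ++ PySem.Str.join "_" [m1, m2]]
          = ([] : List String) ++ [PySem.Int.toStr 1 ++ "_" ++ PySem.Str.join "_" [m1, m2]] from rfl,
        lemB rest 1 [] _, List.nil_append, joinS_one, joinS_two]
    simp [PySem.Int.mod, PySem.Int.floordiv, String.append_assoc]

-- ===== VERDICT (by name: the statement is the Claim_ definition above) =====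
theorem initial_moves_slug_py_spec : Claim_equal_initial_moves_slug_py := by
  intro s _
  unfold Spec_initial_moves_slug_py initial_moves_slug_py initial_moves_slug_py_alt
  exact main_eq _
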